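-- pv_equiv track=rewrite | github.com/MastaTabs/ulti2kicad | ulti2kicad.py | split_odd
-- ===== SOURCE A (Python) =====
-- def split_odd(arr):
--     result = []
--     sublist = []
--     for num in arr:
--         if num % 2 != 0:
--             if sublist:  # Append the current sublist if not empty
--                 result.append(sublist)
--             sublist = [num]  # Start a new sublist with the odd number
--         else:
--             sublist.append(num)  # Add even numbers to the current sublist
--     if sublist:  # Append the last sublist if not empty
--         result.append(sublist)
--     return result
-- ===== SOURCE B (Python) =====
-- def split_odd(arr):
--     result = []
--     i, n = 0, len(arr)
--     while i < n:
--         j = i + 1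
--         while j < n and arr[j] % 2 == 0:
--             j += 1
--         result.append(arr[i:j])
--         i = j
--     return result
-- ===== Notes on version B (the rewrite author's own statement) =====
-- stated objective: alternative
-- what changed: Replaced A's single accumulator pass (growing a current sublist element by element) with a two-pointer scan that finds each group's end index and emits the group as one slice arr[i:j].
import Mathlib
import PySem

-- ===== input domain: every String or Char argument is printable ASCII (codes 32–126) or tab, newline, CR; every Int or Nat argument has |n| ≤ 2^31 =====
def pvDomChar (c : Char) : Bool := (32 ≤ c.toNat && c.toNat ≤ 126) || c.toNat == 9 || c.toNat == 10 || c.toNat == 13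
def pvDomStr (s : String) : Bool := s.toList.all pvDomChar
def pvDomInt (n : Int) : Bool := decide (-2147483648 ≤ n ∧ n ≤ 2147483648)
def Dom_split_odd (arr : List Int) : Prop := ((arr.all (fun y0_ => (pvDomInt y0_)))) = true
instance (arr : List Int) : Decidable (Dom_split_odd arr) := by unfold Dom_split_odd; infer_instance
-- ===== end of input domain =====

-- B replaces A's running-accumulator pass by a two-pointer scan emitting each group as one slice; same O(n) cost, different decomposition.

-- ===== PORT A =====
-- one step of A's for-loop over (result, sublist)
def splitStep (st : List (List Int) × List Int) (num : Int) : List (List Int) × List Int :=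
  if PySem.Int.mod num 2 ≠ 0 then
    ((if st.2 ≠ [] then st.1 ++ [st.2] else st.1), [num])
  else
    (st.1, st.2 ++ [num])

def split_odd (arr : List Int) : List (List Int) :=
  let s := arr.foldl splitStep ([], [])
  if s.2 ≠ [] then s.1 ++ [s.2] else s.1

-- ===== PORT B =====
-- outer while = recursion on the remaining suffix; inner while advancing j over evens = takeWhile,
-- the slice arr[i:j] = head :: that even prefix, i = j step = recurse on dropWhile.
def split_odd_alt (arr : List Int) : List (List Int) :=
  match arr with
  | [] => []
  | x :: rest =>
      (x :: rest.takeWhile (fun n => PySem.Int.mod n 2 == 0)) ::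
        split_odd_alt (rest.dropWhile (fun n => PySem.Int.mod n 2 == 0))
  termination_by arr.length
  decreasing_by
    simp only [List.length_cons]
    exact Nat.lt_succ_of_le (List.length_dropWhile_le _ _)

-- ===== PRECONDITION & SPEC =====
def Spec_split_odd (arr : List Int) (out : List (List Int)) : Prop := out = split_odd_alt arr
instance (arr : List Int) (out : List (List Int)) : Decidable (Spec_split_odd arr out) := by unfold Spec_split_odd; infer_instance

-- ===== CLAIM (what is proved, stated in full; the proofs are below) =====
def Claim_equal_split_odd : Prop := ∀ (arr : List Int), Dom_split_odd arr → Spec_split_odd arr (split_odd arr)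

-- ===== LEMMAS AND PROOFS =====

lemma split_odd_alt_nil : split_odd_alt [] = [] := by
  rw [split_odd_alt.eq_def]

lemma split_odd_alt_cons (x : Int) (rest : List Int) :
    split_odd_alt (x :: rest) =
      (x :: rest.takeWhile (fun n => PySem.Int.mod n 2 == 0)) ::
        split_odd_alt (rest.dropWhile (fun n => PySem.Int.mod n 2 == 0)) := by
  rw [split_odd_alt.eq_def]

-- A's final "append the last sublist if non-empty"
def finishA (s : List (List Int) × List Int) : List (List Int) :=
  if s.2 ≠ [] then s.1 ++ [s.2] else s.1

lemma split_odd_eq_finish (arr : List Int) :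
    split_odd arr = finishA (arr.foldl splitStep ([], [])) := rfl

-- the fold only ever appends to the first component
lemma foldl_splitStep_shift (l : List Int) (res : List (List Int)) (sub : List Int) :
    l.foldl splitStep (res, sub) =
      (res ++ (l.foldl splitStep ([], sub)).1, (l.foldl splitStep ([], sub)).2) := by
  induction l generalizing res sub with
  | nil => simp
  | cons x t ih =>
    have hstep : ∀ r, splitStep (r, sub) x =
        (r ++ (splitStep ([], sub) x).1, (splitStep ([], sub) x).2) := by
      intro r
      simp only [splitStep]
      split_ifs <;> simp
    simp only [List.foldl_cons]
    rw [hstep res, ih, hstep []]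
    rw [ih (([] : List (List Int)) ++ (splitStep ([], sub) x).1) (splitStep ([], sub) x).2]
    simp

lemma finishA_shift (r : List (List Int)) (p : List (List Int) × List Int) :
    finishA (r ++ p.1, p.2) = r ++ finishA p := by
  simp only [finishA]
  split_ifs <;> simp

lemma foldl_finish (l : List Int) (sub : List Int) (h : sub ≠ []) :
    finishA (l.foldl splitStep ([], sub)) =
      (sub ++ l.takeWhile (fun n => PySem.Int.mod n 2 == 0)) ::
        split_odd_alt (l.dropWhile (fun n => PySem.Int.mod n 2 == 0)) := by
  induction l generalizing sub with
  | nil =>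
    simp [finishA, h, split_odd_alt_nil]
  | cons x t ih =>
    by_cases hp : PySem.Int.mod x 2 = 0
    · -- even: x joins the current sublist
      have hb : (PySem.Int.mod x 2 == 0) = true := by
        simp only [beq_iff_eq]; exact hp
      have hstep : splitStep ([], sub) x = ([], sub ++ [x]) := by
        simp only [splitStep]
        rw [if_neg (not_not_intro hp)]
      simp only [List.foldl_cons, hstep]
      rw [ih (sub ++ [x]) (by simp)]
      simp only [List.takeWhile_cons, List.dropWhile_cons, hb, if_true, List.append_assoc,
        List.singleton_append]
    · -- odd: close the current sublist, start a new one
      have hb : (PySem.Int.mod x 2 == 0) = false := by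
        rw [beq_eq_false_iff_ne]; exact hp
      have hstep : splitStep ([], sub) x = ([sub], [x]) := by
        simp only [splitStep]
        rw [if_pos hp, if_pos h]
        simp
      simp only [List.foldl_cons, hstep]
      rw [foldl_splitStep_shift t [sub] [x], finishA_shift]
      rw [ih [x] (by simp)]
      simp only [List.takeWhile_cons, List.dropWhile_cons, hb, Bool.false_eq_true, if_false]
      rw [split_odd_alt_cons]
      simp

-- ===== VERDICT (by name: the statement is the Claim_ definition above) =====
theorem split_odd_spec : Claim_equal_split_odd := by
  intro arr _
  show split_odd arr = split_odd_alt arr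
  cases arr with
  | nil => rw [split_odd_alt_nil]; rfl
  | cons x t =>
    rw [split_odd_eq_finish]
    have hfirst : splitStep ([], []) x = ([], [x]) := by
      simp only [splitStep]
      split_ifs <;> simp_all
    simp only [List.foldl_cons, hfirst]
    rw [foldl_finish t [x] (by simp), split_odd_alt_cons]
    simp
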